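-- pv_equiv track=rewrite | github.com/DoubleJONY/KDJ-algorithm-challenge | owen/bruteforce/bf_P1.py | solution
-- ===== SOURCE A (Python) =====
-- import math
--
-- def solution(answers):
--     students = [[1,2,3,4,5], [2,1,2,3,2,4,2,5], [3,3,1,1,2,2,4,4,5,5]]
--     scores = []
--     for i in students:
--         times = math.ceil(len(answers) /len(i) )
--         tmp_answer = i * times
--         tmp_answer = tmp_answer[:len(answers)]
--         tmp_score = 0
--         for k in range(len(tmp_answer)):
--             if tmp_answer[k] == answers[k]:
--                 tmp_score +=1
--         scores.append(tmp_score)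
--     max_score = max(scores)
--     answer=[]
--     for s in range(len(scores)):
--         if scores[s] == max_score:
--             answer.append(s+1)
--     return sorted(answer)
-- ===== SOURCE B (Python) =====
-- def solution(answers):
--     patterns = [[1, 2, 3, 4, 5], [2, 1, 2, 3, 2, 4, 2, 5], [3, 3, 1, 1, 2, 2, 4, 4, 5, 5]]
--     hist = {}
--     for k, v in enumerate(answers):
--         key = (k % 40, v)
--         hist[key] = hist.get(key, 0) + 1
--     scores = [sum(hist.get((r, p[r % len(p)]), 0) for r in range(40)) for p in patterns]
--     best = max(scores)
--     return sorted(j + 1 for j, s in enumerate(scores) if s == best)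
-- ===== Notes on version B (the rewrite author's own statement) =====
-- stated objective: alternative
-- what changed: B scores by a different method: one pass over answers builds a hash-table histogram keyed by (index mod 40, value) (40 = lcm of the pattern lengths), and each pattern's score is then computed purely from that 40-entry table by residue-class lookups, never re-reading answers; A instead materializes a tiled-and-truncated copy of each pattern and re-scans answers once per pattern.
import Mathlib
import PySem

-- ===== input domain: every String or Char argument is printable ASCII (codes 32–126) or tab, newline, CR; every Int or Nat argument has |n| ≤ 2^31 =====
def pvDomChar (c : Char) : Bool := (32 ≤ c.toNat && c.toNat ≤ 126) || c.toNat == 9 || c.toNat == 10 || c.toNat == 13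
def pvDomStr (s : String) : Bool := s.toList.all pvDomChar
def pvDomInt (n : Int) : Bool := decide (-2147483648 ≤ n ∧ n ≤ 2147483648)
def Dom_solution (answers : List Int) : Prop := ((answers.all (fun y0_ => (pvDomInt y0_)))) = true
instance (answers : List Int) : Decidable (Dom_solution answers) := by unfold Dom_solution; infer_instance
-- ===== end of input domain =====

-- B scores by a different mechanism: one pass builds a histogram keyed by (index mod 40, value)
-- (40 = lcm of the three pattern lengths) and each pattern's score is then read off that table,
-- instead of A's tiled-pattern copy and re-scan of answers per pattern.

-- ===== PORT A =====
-- inner loop of A for one pattern i: build i * times, truncate, count positional matches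
def solutionScoreA (answers i : List Int) : Int :=
  let times : Nat := (answers.length + i.length - 1) / i.length   -- math.ceil(len(answers)/len(i)), exact for these ints
  let tmp : List Int := ((List.replicate times i).flatten).take answers.length
  (PySem.List.pyRange 0 (tmp.length : Int) 1).foldl
    (fun s k => if PySem.List.pyGetD tmp k 0 = PySem.List.pyGetD answers k 0 then s + 1 else s) 0

def solution (answers : List Int) : List Int :=
  let students : List (List Int) := [[1,2,3,4,5], [2,1,2,3,2,4,2,5], [3,3,1,1,2,2,4,4,5,5]]
  let scores : List Int := students.foldl (fun acc i => acc ++ [solutionScoreA answers i]) []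
  let maxScore : Int := (PySem.List.max? scores (fun x => x)).getD 0
  let answer : List Int := (PySem.List.pyRange 0 (scores.length : Int) 1).foldl
    (fun acc s => if PySem.List.pyGetD scores s 0 = maxScore then acc ++ [s + 1] else acc) []
  PySem.List.sorted answer (fun x => x) false

-- ===== PORT B =====
-- the histogram pass of Source B: hist[(k % 40, v)] += 1 over enumerate(answers)
def histB (answers : List Int) : PySem.Dict (Int × Int) Int :=
  (PySem.List.enumerate answers).foldl
    (fun d kv => d.insert (PySem.Int.mod kv.1 40, kv.2) (d.getD (PySem.Int.mod kv.1 40, kv.2) 0 + 1))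
    PySem.Dict.empty

def solution_alt (answers : List Int) : List Int :=
  let patterns : List (List Int) := [[1,2,3,4,5], [2,1,2,3,2,4,2,5], [3,3,1,1,2,2,4,4,5,5]]
  let hist := histB answers
  let scores : List Int := patterns.map (fun p =>
    ((PySem.List.pyRange 0 40 1).map (fun r =>
      hist.getD (r, PySem.List.pyGetD p (PySem.Int.mod r (p.length : Int)) 0) 0)).sum)
  let best : Int := (PySem.List.max? scores (fun x => x)).getD 0
  PySem.List.sorted
    (((PySem.List.enumerate scores).filter (fun js => js.2 = best)).map (fun js => js.1 + 1))
    (fun x => x) false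

-- ===== PRECONDITION & SPEC =====
def Spec_solution (answers : List Int) (out : List Int) : Prop := out = solution_alt answers
instance (answers : List Int) (out : List Int) : Decidable (Spec_solution answers out) := by unfold Spec_solution; infer_instance

-- ===== CLAIM (what is proved, stated in full; the proofs are below) =====
def Claim_equal_solution : Prop := ∀ (answers : List Int), Dom_solution answers → Spec_solution answers (solution answers)

-- ===== LEMMAS AND PROOFS =====

-- common middle form: count of positions whose answer matches g(index mod 40)
def cntA (answers : List Int) (g : Int → Int) : Int :=
  ((PySem.List.enumerate answers).countP (fun kv => kv.2 == g (PySem.Int.mod kv.1 40)) : Int)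

-- mod collapses through the divisor of 40
lemma mod_mod_40 (k m : Int) (hm : 0 < m) (hd : m ∣ 40) :
    PySem.Int.mod (PySem.Int.mod k 40) m = PySem.Int.mod k m := by
  rw [PySem.Int.mod_eq_emod_of_pos (by norm_num : (0:Int) < 40),
      PySem.Int.mod_eq_emod_of_pos hm, PySem.Int.mod_eq_emod_of_pos hm,
      Int.emod_emod_of_dvd _ hd]

-- indexing into the flattened repetition is modular indexing into the pattern
lemma flatten_replicate_getD (p : List Int) :
    ∀ (t k : Nat), k < t * p.length →
      ((List.replicate t p).flatten).getD k 0 = p.getD (k % p.length) 0 := by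
  intro t
  induction t with
  | zero => intro k hk; omega
  | succ t ih =>
      intro k hk
      rw [List.replicate_succ, List.flatten_cons]
      by_cases h : k < p.length
      · rw [List.getD_append _ _ _ _ h, Nat.mod_eq_of_lt h]
      · have h' : p.length ≤ k := by omega
        have hs : (t + 1) * p.length = t * p.length + p.length := Nat.succ_mul t p.length
        have hk' : k - p.length < t * p.length := by omega
        rw [List.getD_append_right _ _ _ _ h', ih _ hk']
        have hmod : (k - p.length) % p.length = k % p.length := by
          conv_rhs => rw [show k = p.length + (k - p.length) from by omega]
          rw [Nat.add_mod_left]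
        rw [hmod]

-- A's per-pattern score equals the modular-index count (p.length divides 40)
lemma scoreA_eq_cntA (answers p : List Int) (hp : 0 < p.length) (hd : (p.length : Int) ∣ 40) :
    solutionScoreA answers p
      = cntA answers (fun r => PySem.List.pyGetD p (PySem.Int.mod r (p.length : Int)) 0) := by
  simp only [solutionScoreA, cntA]
  have hle : answers.length ≤ ((answers.length + p.length - 1) / p.length) * p.length := by
    rcases Nat.eq_zero_or_pos answers.length with h0 | h0
    · rw [h0]; exact Nat.zero_le _
    · have h2 : (answers.length - 1) + p.length ≤ answers.length + p.length - 1 := by omega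
      have h3 := Nat.div_le_div_right (c := p.length) h2
      rw [Nat.add_div_right _ hp] at h3
      have h4 := (Nat.div_lt_iff_lt_mul hp).mp
        (by omega : (answers.length - 1) / p.length < (answers.length + p.length - 1) / p.length)
      omega
  set times := (answers.length + p.length - 1) / p.length with htimes
  set tmp := ((List.replicate times p).flatten).take answers.length with htmpdef
  have hflat : ((List.replicate times p).flatten).length = times * p.length := by simp
  have hlen : tmp.length = answers.length := by
    rw [htmpdef, List.length_take, hflat]; omega
  have hfold : (fun (s : Int) (k : Int) =>
        if PySem.List.pyGetD tmp k 0 = PySem.List.pyGetD answers k 0 then s + 1 else s)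
      = (fun (s : Int) (k : Int) =>
        if (PySem.List.pyGetD tmp k 0 == PySem.List.pyGetD answers k 0) = true then s + 1 else s) := by
    funext s k; simp
  rw [hlen, PySem.List.enumerate_eq_map_pyRange answers 0, List.countP_map, hfold,
    PySem.List.foldl_count_if, Int.zero_add, PySem.List.len_eq]
  congr 1
  apply List.countP_congr
  intro x hx
  rw [PySem.List.mem_pyRange_one] at hx
  obtain ⟨j, rfl⟩ : ∃ j : Nat, x = (j : Int) := ⟨x.toNat, (Int.toNat_of_nonneg hx.1).symm⟩
  have hj : j < answers.length := by exact_mod_cast hx.2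
  have hval : tmp.getD j 0 = p.getD (j % p.length) 0 := by
    have hjt : j < times * p.length := lt_of_lt_of_le hj hle
    rw [htmpdef,
        show (((List.replicate times p).flatten).take answers.length).getD j 0
          = ((List.replicate times p).flatten).getD j 0 from by simp [List.getD, hj]]
    exact flatten_replicate_getD p times j hjt
  simp only [Function.comp, mod_mod_40 _ _ (by exact_mod_cast hp) hd,
    PySem.List.pyGetD_natCast, PySem.Int.mod_natCast, hval]
  simp only [beq_iff_eq]
  exact eq_comm

-- the histogram pass counts (index mod 40, value) pairs: invariant of Source B's dict loop
lemma histB_getD_aux (f : Int × Int → Int × Int) :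
    ∀ (l : List (Int × Int)) (d : PySem.Dict (Int × Int) Int) (x : Int × Int),
      (l.foldl (fun d kv => d.insert (f kv) (d.getD (f kv) 0 + 1)) d).getD x 0
        = d.getD x 0 + (List.count x (l.map f) : Int) := by
  intro l
  induction l with
  | nil => intro d x; simp
  | cons a t ih =>
      intro d x
      rw [List.foldl_cons, ih, List.map_cons, List.count_cons]
      rw [PySem.Dict.getD_insert]
      by_cases h : x = f a
      · rw [if_pos h, h]
        push_cast
        simp
        ring
      · rw [if_neg h]
        push_cast
        simp [beq_iff_eq, Ne.symm h]

-- the histogram lookup is a count of (index mod 40, value) pairs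
lemma histB_getD (answers : List Int) (x : Int × Int) :
    (histB answers).getD x 0
      = (List.count x ((PySem.List.enumerate answers).map
          (fun kv => (PySem.Int.mod kv.1 40, kv.2))) : Int) := by
  unfold histB
  rw [histB_getD_aux (fun kv => (PySem.Int.mod kv.1 40, kv.2)), PySem.Dict.getD_empty, Int.zero_add]

-- summing an equality indicator over a duplicate-free list
lemma sum_indicator (g : Int → Int) (m v : Int) :
    ∀ rs : List Int, rs.Nodup →
      ((rs.map (fun r => if ((m, v) : Int × Int) = (r, g r) then (1 : Int) else 0)).sum
        = if m ∈ rs ∧ v = g m then 1 else 0) := by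
  intro rs
  induction rs with
  | nil => intro _; simp
  | cons r t ih =>
      intro hnd
      rw [List.map_cons, List.sum_cons, ih (List.nodup_cons.mp hnd).2]
      by_cases hrm : r = m
      · have hnot : m ∉ t := by rw [hrm] at hnd; exact (List.nodup_cons.mp hnd).1
        have hpair : (((m, v) : Int × Int) = (r, g r)) ↔ (v = g m) := by
          rw [hrm]; constructor
          · intro h; exact ((Prod.mk.injEq _ _ _ _).mp h).2
          · intro h; rw [h]
        by_cases hv : v = g m
        · simp [hv, hrm, hnot]
        · simp [hpair, hv, hnot]
      · have hpair : (((m, v) : Int × Int) ≠ (r, g r)) := by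
          intro h; exact hrm ((Prod.mk.injEq _ _ _ _).mp h).1.symm
        by_cases hmt : m ∈ t
        · simp [hpair, hmt, Ne.symm hrm]
        · simp [hpair, hmt, Ne.symm hrm]

-- the 40 residue-class lookups add up to the modular-index count
lemma sum_count (g : Int → Int) :
    ∀ l : List (Int × Int),
      ((PySem.List.pyRange 0 40 1).map (fun r =>
          (List.count ((r, g r) : Int × Int)
            (l.map (fun kv => (PySem.Int.mod kv.1 40, kv.2))) : Int))).sum
        = (l.countP (fun kv => kv.2 == g (PySem.Int.mod kv.1 40)) : Int) := by
  intro l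
  induction l with
  | nil => simp
  | cons kv t ih =>
      rw [List.map_cons, List.countP_cons]
      have hstep : ∀ r : Int,
          (List.count ((r, g r) : Int × Int)
              (((PySem.Int.mod kv.1 40, kv.2)) :: t.map (fun kv => (PySem.Int.mod kv.1 40, kv.2))) : Int)
            = (List.count ((r, g r) : Int × Int)
                (t.map (fun kv => (PySem.Int.mod kv.1 40, kv.2))) : Int)
              + (if ((PySem.Int.mod kv.1 40, kv.2) : Int × Int) = (r, g r) then (1 : Int) else 0) := by
        intro r
        rw [List.count_cons]
        push_cast
        simp [beq_iff_eq]
      have hmap : (PySem.List.pyRange 0 40 1).map (fun r =>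
            (List.count ((r, g r) : Int × Int)
              (((PySem.Int.mod kv.1 40, kv.2)) :: t.map (fun kv => (PySem.Int.mod kv.1 40, kv.2))) : Int))
          = (PySem.List.pyRange 0 40 1).map (fun r =>
              (List.count ((r, g r) : Int × Int)
                (t.map (fun kv => (PySem.Int.mod kv.1 40, kv.2))) : Int)
              + (if ((PySem.Int.mod kv.1 40, kv.2) : Int × Int) = (r, g r) then (1 : Int) else 0)) := by
        apply List.map_congr_left; intro r _; exact hstep r
      rw [hmap, PySem.List.sum_map_add_int, ih]
      rw [sum_indicator g (PySem.Int.mod kv.1 40) kv.2 _ (PySem.List.nodup_pyRange_one 0 40)]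
      push_cast
      have h1 : (0:Int) ≤ kv.1 % 40 := Int.emod_nonneg kv.1 (by norm_num)
      have h2 : kv.1 % 40 < 40 := Int.emod_lt_of_pos kv.1 (by norm_num)
      simp [h1, h2]

-- B's per-pattern table aggregation equals the modular-index count
lemma scoreB_eq_cntA (answers p : List Int) :
    ((PySem.List.pyRange 0 40 1).map (fun r =>
        (histB answers).getD (r, PySem.List.pyGetD p (PySem.Int.mod r (p.length : Int)) 0) 0)).sum
      = cntA answers (fun r => PySem.List.pyGetD p (PySem.Int.mod r (p.length : Int)) 0) := by
  have hm : (PySem.List.pyRange 0 40 1).map (fun r =>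
        (histB answers).getD (r, PySem.List.pyGetD p (PySem.Int.mod r (p.length : Int)) 0) 0)
      = (PySem.List.pyRange 0 40 1).map (fun r =>
          (List.count ((r, PySem.List.pyGetD p (PySem.Int.mod r (p.length : Int)) 0) : Int × Int)
            ((PySem.List.enumerate answers).map (fun kv => (PySem.Int.mod kv.1 40, kv.2))) : Int)) := by
    apply List.map_congr_left; intro r _; exact histB_getD answers _
  rw [hm, sum_count, cntA]

-- the common winner-collection stage, on an arbitrary triple of scores
lemma final_stage (x y z M : Int) :
    (PySem.List.pyRange 0 (3 : Int) 1).foldl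
        (fun acc s => if PySem.List.pyGetD [x,y,z] s 0 = M then acc ++ [s + 1] else acc) []
      = ((PySem.List.enumerate [x,y,z]).filter (fun js => js.2 = M)).map (fun js => js.1 + 1) := by
  rw [show PySem.List.pyRange 0 (3 : Int) 1 = [0, 1, 2] from by decide]
  simp only [PySem.List.enumerate_cons, PySem.List.enumerate_nil, List.foldl_cons, List.foldl_nil]
  norm_num [PySem.List.pyGetD, PySem.List.pyIdx?]
  rcases eq_or_ne x M with h1 | h1 <;> rcases eq_or_ne y M with h2 | h2 <;>
    rcases eq_or_ne z M with h3 | h3 <;> simp [h1, h2, h3, List.filter]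

-- ===== VERDICT (by name: the statement is the Claim_ definition above) =====
theorem solution_spec : Claim_equal_solution := by
  unfold Claim_equal_solution
  intro answers _
  unfold Spec_solution solution solution_alt
  have h1 := (scoreA_eq_cntA answers [1,2,3,4,5] (by norm_num) (by norm_num)).trans
    (scoreB_eq_cntA answers [1,2,3,4,5]).symm
  have h2 := (scoreA_eq_cntA answers [2,1,2,3,2,4,2,5] (by norm_num) (by norm_num)).trans
    (scoreB_eq_cntA answers [2,1,2,3,2,4,2,5]).symm
  have h3 := (scoreA_eq_cntA answers [3,3,1,1,2,2,4,4,5,5] (by norm_num) (by norm_num)).trans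
    (scoreB_eq_cntA answers [3,3,1,1,2,2,4,4,5,5]).symm
  simp only [List.foldl_cons, List.foldl_nil, List.nil_append, List.cons_append,
    List.map_cons, List.map_nil, h1, h2, h3, List.length_cons, List.length_nil]
  norm_num [final_stage]
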